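-- pv_equiv track=rewrite | github.com/dharmeshparikh-cloud/DVBC-ERP | backend/services/telegram_bot.py | get_quick_reply_keyboard
-- ===== SOURCE A (Python) =====
-- def get_quick_reply_keyboard(options: list) -> dict:
--     """Create inline keyboard with quick reply buttons"""
--     keyboard = []
--     row = []
--     for i, option in enumerate(options):
--         row.append({"text": option, "callback_data": option})
--         if len(row) == 3 or i == len(options) - 1:
--             keyboard.append(row)
--             row = []
--     return {"inline_keyboard": keyboard}
-- ===== SOURCE B (Python) =====
-- def get_quick_reply_keyboard(options: list) -> dict:
--     """Create inline keyboard with quick reply buttons"""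
--     keyboard = [
--         [{"text": o, "callback_data": o} for o in options[i:i + 3]]
--         for i in range(0, len(options), 3)
--     ]
--     return {"inline_keyboard": keyboard}
-- ===== Notes on version B (the rewrite author's own statement) =====
-- stated objective: idiomatic
-- what changed: Replaced the per-element accumulate-and-flush loop (row counter plus len(row)==3 / last-index flush condition) with a single comprehension that steps over start indices by 3 and slices each row out directly.
import Mathlib
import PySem

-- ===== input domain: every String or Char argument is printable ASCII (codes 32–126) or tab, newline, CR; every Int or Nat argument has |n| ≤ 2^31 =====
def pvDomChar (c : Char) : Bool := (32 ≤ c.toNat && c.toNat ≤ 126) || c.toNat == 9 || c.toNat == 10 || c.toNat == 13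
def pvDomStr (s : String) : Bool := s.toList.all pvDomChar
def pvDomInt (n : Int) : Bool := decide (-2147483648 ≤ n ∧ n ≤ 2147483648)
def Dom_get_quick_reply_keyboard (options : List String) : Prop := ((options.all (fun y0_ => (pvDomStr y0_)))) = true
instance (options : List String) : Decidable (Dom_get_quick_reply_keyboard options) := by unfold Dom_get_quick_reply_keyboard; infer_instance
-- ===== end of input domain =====

-- B replaces A's accumulate-and-flush loop with range-stepped slicing (more idiomatic); return values proved equal on all inputs.

-- the button dict {"text": option, "callback_data": option} (identical literal in both Pythons)
def pvMk (o : String) : List (String × String) := [("text", o), ("callback_data", o)]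

-- ===== PORT A =====
-- one loop iteration of A: append the button to `row`, flush when full or at the last index
def pvAStep (n : Int)
    (st : List (List (List (String × String))) × List (List (String × String)))
    (p : Int × String) : List (List (List (String × String))) × List (List (String × String)) :=
  let row := st.2 ++ [pvMk p.2]
  if row.length = 3 ∨ p.1 = n - 1 then (st.1 ++ [row], []) else (st.1, row)

def get_quick_reply_keyboard (options : List String) : List (String × List (List (List (String × String)))) :=
  [("inline_keyboard",
    ((PySem.List.enumerate options 0).foldl (pvAStep (PySem.List.len options)) ([], [])).1)]

-- ===== PORT B =====
def get_quick_reply_keyboard_alt (options : List String) : List (String × List (List (List (String × String)))) :=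
  [("inline_keyboard",
    (PySem.List.pyRange 0 (PySem.List.len options) 3).map
      (fun i => (PySem.List.slice options (some i) (some (i + 3))).map pvMk))]

-- ===== PRECONDITION & SPEC =====
def Spec_get_quick_reply_keyboard (options : List String) (out : List (String × List (List (List (String × String))))) : Prop := out = get_quick_reply_keyboard_alt options
instance (options : List String) (out : List (String × List (List (List (String × String))))) : Decidable (Spec_get_quick_reply_keyboard options out) := by unfold Spec_get_quick_reply_keyboard; infer_instance

-- ===== CLAIM (what is proved, stated in full; the proofs are below) =====
def Claim_equal_get_quick_reply_keyboard : Prop := ∀ (options : List String), Dom_get_quick_reply_keyboard options → Spec_get_quick_reply_keyboard options (get_quick_reply_keyboard options)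

-- ===== LEMMAS AND PROOFS =====

-- the common value: the options chunked into rows of 3, each element turned into a button
def pvRowsOf : List String → List (List (List (String × String)))
  | [] => []
  | [a] => [[pvMk a]]
  | [a, b] => [[pvMk a, pvMk b]]
  | a :: b :: c :: t => [pvMk a, pvMk b, pvMk c] :: pvRowsOf t

theorem pvRowsOf_chunk (x : String) (t : List String) :
    pvRowsOf (x :: t) = (((x :: t).take 3).map pvMk) :: pvRowsOf ((x :: t).drop 3) := by
  cases t with
  | nil => rfl
  | cons b t' => cases t' <;> rfl

-- A's fold, started at any index i with an empty row, appends exactly the chunked rows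
theorem pvALoop (m : Nat) : ∀ (l : List String), l.length = m → l ≠ [] →
    ∀ (n i : Int) (kb : List (List (List (String × String)))), i + l.length = n →
    ((PySem.List.enumerate l i).foldl (pvAStep n) (kb, [])).1 = kb ++ pvRowsOf l := by
  induction m using Nat.strong_induction_on with
  | _ m ih =>
    intro l hlen hne n i kb hn
    match l with
    | [] => exact absurd rfl hne
    | [a] =>
      have hi : i = n - 1 := by simp at hn; omega
      simp only [PySem.List.enumerate_cons, PySem.List.enumerate_nil, List.foldl_cons,
        List.foldl_nil, pvAStep]
      simp [hi, pvRowsOf]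
    | [a, b] =>
      have h1 : ¬ (i = n - 1) := by simp at hn; omega
      have h2 : i + 1 = n - 1 := by simp at hn; omega
      simp only [PySem.List.enumerate_cons, PySem.List.enumerate_nil, List.foldl_cons,
        List.foldl_nil, pvAStep]
      simp [h1, h2, pvRowsOf]
    | a :: b :: c :: t =>
      have h1 : ¬ (i = n - 1) := by simp at hn; omega
      have h2 : ¬ (i + 1 = n - 1) := by simp at hn; omega
      have hrows : pvRowsOf (a :: b :: c :: t) = [pvMk a, pvMk b, pvMk c] :: pvRowsOf t := by
        rw [pvRowsOf_chunk]; simp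
      simp only [PySem.List.enumerate_cons, List.foldl_cons, pvAStep]
      simp [h1, h2]
      by_cases ht : t = []
      · subst ht
        simp [PySem.List.enumerate_nil, pvRowsOf]
      · have hm : t.length < m := by simp at hlen; omega
        have := ih t.length hm t rfl ht n (i + 1 + 1 + 1)
          (kb ++ [[pvMk a, pvMk b, pvMk c]]) (by simp at hn ⊢; omega)
        rw [this, hrows]
        simp

-- B's row list, phrased over List.range with Nat indices, is the chunking
theorem pvBLoop (m : Nat) : ∀ (l : List String), l.length = m →
    (List.range ((l.length + 2) / 3)).map
      (fun k => ((l.drop (3 * k)).take 3).map pvMk) = pvRowsOf l := by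
  induction m using Nat.strong_induction_on with
  | _ m ih =>
    intro l hlen
    match l with
    | [] => simp [pvRowsOf]
    | x :: t =>
      have hcnt : ((x :: t).length + 2) / 3 = (((x :: t).drop 3).length + 2) / 3 + 1 := by
        have hl3 : ((x :: t).drop 3).length = t.length + 1 - 3 := by simp
        rw [hl3, List.length_cons]; omega
      rw [pvRowsOf_chunk, hcnt, List.range_succ_eq_map, List.map_cons, List.map_map]
      have hm : ((x :: t).drop 3).length < m := by
        have : ((x :: t).drop 3).length = t.length + 1 - 3 := by simp
        rw [this]; omega
      rw [← ih ((x :: t).drop 3).length hm ((x :: t).drop 3) rfl]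
      have hhead : List.drop (3 * 0) (x :: t) = x :: t := by norm_num
      have htail : List.map ((fun k => List.map pvMk (List.take 3 (List.drop (3 * k) (x :: t)))) ∘ Nat.succ)
            (List.range ((((x :: t).drop 3).length + 2) / 3))
          = List.map (fun k => List.map pvMk (List.take 3 (List.drop (3 * k) ((x :: t).drop 3))))
            (List.range ((((x :: t).drop 3).length + 2) / 3)) := by
        apply List.map_congr_left
        intro k _
        simp only [Function.comp_apply, Nat.succ_eq_add_one]
        have e1 : List.drop (3 * (k + 1)) (x :: t) = List.drop (3 * k + 2) t := by
          rw [show 3 * (k + 1) = (3 * k + 2) + 1 from by ring, List.drop_succ_cons]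
        have e2 : List.drop (3 * k) ((x :: t).drop 3) = List.drop (3 * k + 2) t := by
          rw [List.drop_drop, show 3 + 3 * k = (3 * k + 2) + 1 from by ring, List.drop_succ_cons]
        rw [e1, e2]
      rw [hhead, htail]

-- bridge B's pyRange/slice form to the Nat-indexed form of pvBLoop
theorem pvBForm (l : List String) :
    (PySem.List.pyRange 0 (PySem.List.len l) 3).map
      (fun i => (PySem.List.slice l (some i) (some (i + 3))).map pvMk)
      = pvRowsOf l := by
  rw [PySem.List.len_eq, PySem.List.pyRange_of_pos 0 (l.length : Int) (by norm_num)]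
  have hcnt : (if (0:Int) < (l.length : Int) then (((l.length : Int) - 0 + 3 - 1) / 3).toNat else 0)
      = (l.length + 2) / 3 := by
    split <;> omega
  rw [hcnt, List.map_map]
  rw [← pvBLoop l.length l rfl]
  apply List.map_congr_left
  intro k _
  simp only [Function.comp]
  have e1 : (0 + 3 * (k : Int)) = ((3 * k : Nat) : Int) := by push_cast; ring
  have e2 : ((3 * k : Nat) : Int) + 3 = ((3 * k : Nat) : Int) + ((3 : Nat) : Int) := by norm_num
  rw [e1, e2, PySem.List.slice_natCast_add]

-- ===== VERDICT (by name: the statement is the Claim_ definition above) =====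
theorem get_quick_reply_keyboard_spec : Claim_equal_get_quick_reply_keyboard := by
  intro options _
  unfold Spec_get_quick_reply_keyboard get_quick_reply_keyboard get_quick_reply_keyboard_alt
  rw [pvBForm]
  cases options with
  | nil => decide
  | cons x t =>
    rw [pvALoop (x :: t).length (x :: t) rfl (by simp) (PySem.List.len (x :: t)) 0 []
      (by simp [PySem.List.len_eq])]
    simp
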